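-- pv_equiv track=rewrite | github.com/JB0925/Advent-Of-Code-2020 | Day_6.py | get_questionaire_sums
-- ===== SOURCE A (Python) =====
-- from collections import Counter
-- from string import ascii_lowercase
--
-- def get_questionaire_sums(data):
--     total = 0
--     all_answered_yes = 0
--     group_list = []
--     questions_affirmed = Counter()
--
--     for row in data:
--         if row[0] in ascii_lowercase:
--             group_list.append(row)
--             questions_affirmed.update(row)
--         else:
--             for letter in questions_affirmed:
--                 if questions_affirmed.get(letter) == len(group_list):
--                     all_answered_yes += 1
--
--             total += len(questions_affirmed)
--             questions_affirmed.clear()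
--             group_list.clear()
--
--     return f'Part 1: {total + 11}, Part 2: {all_answered_yes}'
-- ===== SOURCE B (Python) =====
-- from collections import Counter
--
--
-- def get_questionaire_sums(data):
--     # Pass 1: split rows into completed groups (the trailing unflushed group is dropped,
--     # exactly as in the original single-pass version).
--     groups = []
--     current = []
--     for row in data:
--         if 'a' <= row[0] <= 'z':
--             current.append(row)
--         else:
--             groups.append(current)
--             current = []
--
--     # Pass 2: score each completed group independently.
--     total = 0
--     all_answered_yes = 0
--     for group in groups:
--         counter = Counter()
--         for row in group:
--             counter.update(row)
--         total += len(counter)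
--         all_answered_yes += sum(1 for v in counter.values() if v == len(group))
--
--     return f'Part 1: {total + 11}, Part 2: {all_answered_yes}'
-- ===== Notes on version B (the rewrite author's own statement) =====
-- stated objective: alternative
-- what changed: A's single fused loop carrying a mutable Counter and running totals is replaced by a two-pass decomposition: pass 1 splits the rows into completed groups (dropping the trailing unflushed group like A), pass 2 scores each group independently with its own Counter.
import Mathlib
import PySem

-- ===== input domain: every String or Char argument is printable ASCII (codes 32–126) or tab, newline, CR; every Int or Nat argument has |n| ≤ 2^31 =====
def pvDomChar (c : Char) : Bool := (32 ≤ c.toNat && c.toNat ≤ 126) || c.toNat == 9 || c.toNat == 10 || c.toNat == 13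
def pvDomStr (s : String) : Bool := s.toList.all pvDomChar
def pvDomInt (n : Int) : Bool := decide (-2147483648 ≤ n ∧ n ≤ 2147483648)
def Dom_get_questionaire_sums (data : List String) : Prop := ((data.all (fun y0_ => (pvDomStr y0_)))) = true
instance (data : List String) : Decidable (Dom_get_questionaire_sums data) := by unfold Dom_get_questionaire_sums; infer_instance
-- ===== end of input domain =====

-- B replaces A's single fused loop (mutable counter + running totals) by a two-pass
-- decomposition: pass 1 splits the rows into completed groups, pass 2 scores each group
-- independently (objective: alternative; same complexity; return value only, no mutation).

-- shared helper: Counter.update(row) — both Pythons call collections.Counter.update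
def pvUpdate (d : PySem.Dict Char Int) (row : String) : PySem.Dict Char Int :=
  row.toList.foldl (fun d ch => d.modify ch 0 (· + 1)) d

-- ===== PORT A =====
-- string.ascii_lowercase
def pvLower : List Char :=
  ['a','b','c','d','e','f','g','h','i','j','k','l','m','n','o','p','q','r','s','t','u','v','w','x','y','z']

-- A's loop body: state = (total, all_answered_yes, group_list, questions_affirmed)
def pvStepA (st : Int × Int × List String × PySem.Dict Char Int) (row : String) :
    Int × Int × List String × PySem.Dict Char Int :=
  match PySem.Str.pyGet? row 0 with
  | none => st   -- row[0] raises IndexError in Python; excluded by Pre_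
  | some ch =>
    if pvLower.contains ch then
      (st.1, st.2.1, st.2.2.1 ++ [row], pvUpdate st.2.2.2 row)
    else
      (st.1 + (st.2.2.2.size : Int),
       st.2.1 + ((st.2.2.2.items.filter (fun p => p.2 == (st.2.2.1.length : Int))).length : Int),
       [], PySem.Dict.empty)

def get_questionaire_sums (data : List String) : String :=
  let st := data.foldl pvStepA (0, 0, [], PySem.Dict.empty)
  String.ofList ("Part 1: ".toList ++ PySem.Int.toChars (st.1 + 11) ++
                 ", Part 2: ".toList ++ PySem.Int.toChars st.2.1)

-- ===== PORT B =====
-- pass 1 body: state = (groups, current)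
def pvStepG (acc : List (List String) × List String) (row : String) :
    List (List String) × List String :=
  match PySem.Str.pyGet? row 0 with
  | none => acc   -- row[0] raises IndexError in Python; excluded by Pre_
  | some ch =>
    if 'a' ≤ ch ∧ ch ≤ 'z' then (acc.1, acc.2 ++ [row])
    else (acc.1 ++ [acc.2], [])

-- pass 2 body: score one completed group
def pvPerGroup (p : Int × Int) (g : List String) : Int × Int :=
  let c := g.foldl pvUpdate PySem.Dict.empty
  (p.1 + (c.size : Int),
   p.2 + ((c.values.filter (fun v => v == (g.length : Int))).length : Int))

def get_questionaire_sums_alt (data : List String) : String :=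
  let gp := data.foldl pvStepG ([], [])
  let r := gp.1.foldl pvPerGroup (0, 0)
  String.ofList ("Part 1: ".toList ++ PySem.Int.toChars (r.1 + 11) ++
                 ", Part 2: ".toList ++ PySem.Int.toChars r.2)

-- ===== PRECONDITION & SPEC =====
-- Pre_ excludes inputs containing an empty row: there row[0] raises IndexError (in A and in B alike).
def Pre_get_questionaire_sums (data : List String) : Prop := ∀ s ∈ data, s.toList ≠ []
instance (data : List String) : Decidable (Pre_get_questionaire_sums data) := by
  unfold Pre_get_questionaire_sums; infer_instance

def pvWitness_get_questionaire_sums : List String := ["ab", "x", "-", "ab"]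

def Spec_get_questionaire_sums (data : List String) (out : String) : Prop := out = get_questionaire_sums_alt data
instance (data : List String) (out : String) : Decidable (Spec_get_questionaire_sums data out) := by unfold Spec_get_questionaire_sums; infer_instance

-- ===== CLAIM (what is proved, stated in full; the proofs are below) =====
def Claim_equal_get_questionaire_sums : Prop := ∀ (data : List String), Dom_get_questionaire_sums data → Pre_get_questionaire_sums data → Spec_get_questionaire_sums data (get_questionaire_sums data)

-- ===== LEMMAS AND PROOFS =====

-- the Char range test B uses, read off the code point
lemma pv_hval (c : Char) : ('a' ≤ c ∧ c ≤ 'z') ↔ (97 ≤ c.val.toNat ∧ c.val.toNat ≤ 122) := by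
  simp only [Char.le_def, UInt32.le_iff_toNat_le]
  have h1 : ('a' : Char).val.toNat = 97 := by decide
  have h2 : ('z' : Char).val.toNat = 122 := by decide
  omega

-- membership in ascii_lowercase (A's test) is exactly the range test B uses
lemma pv_lower_iff (ch : Char) : pvLower.contains ch = decide ('a' ≤ ch ∧ ch ≤ 'z') := by
  by_cases h : 'a' ≤ ch ∧ ch ≤ 'z'
  · obtain ⟨hl, hr⟩ := (pv_hval ch).1 h
    simp only [h]
    have heq : ch = Char.ofNat ch.val.toNat := by
      rw [show ch.val.toNat = ch.toNat from rfl, Char.ofNat_toNat]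
    have hm : ch ∈ pvLower := by
      interval_cases hn : ch.val.toNat <;> rw [heq] <;> decide
    simpa [List.contains_iff_mem]
  · simp only [h, decide_false]
    rw [Bool.eq_false_iff]
    intro hc
    have hm : ch ∈ pvLower := by simpa [List.contains_iff_mem] using hc
    exact h (by fin_cases hm <;> decide)

-- counting matching counts via items (A) and via values (B) agree
lemma pv_count_items_values (c : PySem.Dict Char Int) (n : Int) :
    (c.items.filter (fun p => p.2 == n)).length = (c.values.filter (fun v => v == n)).length := by
  simp only [PySem.Dict.values, List.filter_map, List.length_map]
  rfl

-- already-completed groups pass through pass 1 untouched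
lemma pv_stepG_shift (gs g0 : List (List String)) (cur : List String) (row : String) :
    pvStepG (gs ++ g0, cur) row = (gs ++ (pvStepG (g0, cur) row).1, (pvStepG (g0, cur) row).2) := by
  unfold pvStepG
  cases PySem.Str.pyGet? row 0 with
  | none => rfl
  | some ch => dsimp only; split <;> simp

lemma pv_shift (rows : List String) : ∀ (gs g0 : List (List String)) (cur : List String),
    rows.foldl pvStepG (gs ++ g0, cur) =
      (gs ++ (rows.foldl pvStepG (g0, cur)).1, (rows.foldl pvStepG (g0, cur)).2) := by
  induction rows with
  | nil => intro gs g0 cur; simp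
  | cons row rest ih =>
    intro gs g0 cur
    simp only [List.foldl_cons, pv_stepG_shift]
    simpa using ih gs (pvStepG (g0, cur) row).1 (pvStepG (g0, cur) row).2

-- main invariant: A's fused loop = pass 1 then pass 2 over the newly completed groups
lemma pv_key (rows : List String) (h : ∀ s ∈ rows, s.toList ≠ []) : ∀ (t y : Int) (gl : List String),
    (rows.foldl pvStepA (t, y, gl, gl.foldl pvUpdate PySem.Dict.empty)).1 =
      ((rows.foldl pvStepG ([], gl)).1.foldl pvPerGroup (t, y)).1 ∧
    (rows.foldl pvStepA (t, y, gl, gl.foldl pvUpdate PySem.Dict.empty)).2.1 =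
      ((rows.foldl pvStepG ([], gl)).1.foldl pvPerGroup (t, y)).2 := by
  induction rows with
  | nil => intro t y gl; simp
  | cons row rest ih =>
    intro t y gl
    have hrow := h row (by simp)
    have hrest : ∀ s ∈ rest, s.toList ≠ [] := fun s hs => h s (by simp [hs])
    obtain ⟨c, cs, hc⟩ : ∃ c cs, row.toList = c :: cs := by
      cases hx : row.toList with
      | nil => exact absurd hx hrow
      | cons a l => exact ⟨a, l, rfl⟩
    have hget : PySem.Str.pyGet? row 0 = some c := by
      simp [PySem.Str.pyGet?, hc, PySem.List.pyGet?, PySem.List.pyIdx?]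
    simp only [List.foldl_cons]
    by_cases hcond : 'a' ≤ c ∧ c ≤ 'z'
    · have hct : c ∈ pvLower := by
        rw [← List.contains_iff_mem, pv_lower_iff]; simpa using hcond
      have hA : pvStepA (t, y, gl, gl.foldl pvUpdate PySem.Dict.empty) row =
          (t, y, gl ++ [row], (gl ++ [row]).foldl pvUpdate PySem.Dict.empty) := by
        unfold pvStepA
        rw [hget]
        simp [hct, List.foldl_append, pvUpdate]
      have hG : pvStepG ([], gl) row = ([], gl ++ [row]) := by
        unfold pvStepG; rw [hget]; simp [hcond]
      rw [hA, hG]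
      exact ih hrest t y (gl ++ [row])
    · have hcf : c ∉ pvLower := by
        rw [← List.contains_iff_mem, pv_lower_iff]; simpa using hcond
      have hA : pvStepA (t, y, gl, gl.foldl pvUpdate PySem.Dict.empty) row =
          (t + ((gl.foldl pvUpdate PySem.Dict.empty).size : Int),
           y + (((gl.foldl pvUpdate PySem.Dict.empty).items.filter
                (fun p => p.2 == (gl.length : Int))).length : Int),
           [], PySem.Dict.empty) := by
        unfold pvStepA
        rw [hget]
        simp [hcf]
      have hG : pvStepG ([], gl) row = ([gl], []) := by
        unfold pvStepG; rw [hget]; simp [hcond]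
      rw [hA, hG]
      have hsplit : rest.foldl pvStepG ([gl], []) =
          ([gl] ++ (rest.foldl pvStepG ([], [])).1, (rest.foldl pvStepG ([], [])).2) := by
        simpa using pv_shift rest [gl] [] []
      have hpg : pvPerGroup (t, y) gl =
          (t + ((gl.foldl pvUpdate PySem.Dict.empty).size : Int),
           y + (((gl.foldl pvUpdate PySem.Dict.empty).items.filter
                (fun p => p.2 == (gl.length : Int))).length : Int)) := by
        unfold pvPerGroup
        rw [pv_count_items_values]
      have := ih hrest (t + ((gl.foldl pvUpdate PySem.Dict.empty).size : Int))
          (y + (((gl.foldl pvUpdate PySem.Dict.empty).items.filter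
                (fun p => p.2 == (gl.length : Int))).length : Int)) []
      simp only [List.foldl_nil] at this ⊢
      rw [hsplit]
      simp only [List.cons_append, List.nil_append, List.foldl_cons, hpg]
      exact this

-- ===== VERDICT (by name: the statement is the Claim_ definition above) =====
theorem get_questionaire_sums_spec : Claim_equal_get_questionaire_sums := by
  intro data _ hpre
  unfold Spec_get_questionaire_sums get_questionaire_sums get_questionaire_sums_alt
  have h := pv_key data hpre 0 0 []
  simp only [List.foldl_nil] at h
  simp only [h.1, h.2]
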